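-- pv_equiv track=rewrite | github.com/antonel-iwnl/Python | Assignment1/exercise18.py | commonDigits
-- ===== SOURCE A (Python) =====
-- def commonDigits(N, M):
--     nrcifre = 0
--     f1 = [0] * 10
--     f2 = [0] * 10
--     while (N > 0):
--         f1[N % 10] += 1
--         N = N // 10
--     while (M > 0):
--         f2[M % 10] += 1
--         M = M // 10
--     for i in range(10):
--         if (f1[i] > 0 and f2[i] > 0):
--             nrcifre += 1
--     return nrcifre
-- ===== SOURCE B (Python) =====
-- def commonDigits(N, M):
--     def mask(n):
--         if n <= 0:
--             return 0
--         return (1 << (n % 10)) | mask(n // 10)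
--
--     def popcount(m):
--         if m == 0:
--             return 0
--         return (m & 1) + popcount(m >> 1)
--
--     return popcount(mask(N) & mask(M))
-- ===== Notes on version B (the rewrite author's own statement) =====
-- stated objective: alternative
-- what changed: Replaces the two length-10 frequency arrays and the final scan over range(10) by recursively built digit bitmasks (one bit per digit), a single bitwise AND, and a recursive popcount of the shared-digit mask.
import Mathlib
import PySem

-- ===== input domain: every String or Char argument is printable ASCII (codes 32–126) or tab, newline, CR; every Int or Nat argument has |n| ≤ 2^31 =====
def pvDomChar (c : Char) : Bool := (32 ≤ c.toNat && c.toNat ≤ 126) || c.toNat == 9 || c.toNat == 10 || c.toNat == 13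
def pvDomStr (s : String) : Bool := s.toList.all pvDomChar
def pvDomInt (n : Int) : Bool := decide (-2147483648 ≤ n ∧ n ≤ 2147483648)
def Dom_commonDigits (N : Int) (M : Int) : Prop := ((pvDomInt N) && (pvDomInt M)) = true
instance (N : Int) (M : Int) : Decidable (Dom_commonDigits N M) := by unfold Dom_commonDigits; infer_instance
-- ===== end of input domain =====

-- B replaces A's two length-10 frequency arrays and the range(10) scan by recursively
-- built digit bitmasks, one bitwise AND and a recursive popcount (objective: alternative).

-- termination fact for the digit-extraction recursions (cited by the ports' decreasing_by)
theorem pvDiv10_lt (n : Int) (h : n > 0) : (PySem.Int.floordiv n 10).toNat < n.toNat := by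
  rw [PySem.Int.floordiv_eq_ediv_of_pos (by norm_num : (0:Int) < 10)]
  omega

-- ===== PORT A =====
-- the 'while (N > 0)' frequency-count loop of A
def pvCountLoop (n : Int) (f : List Int) : List Int :=
  if h : n > 0 then
    pvCountLoop (PySem.Int.floordiv n 10)
      (PySem.List.pySetD f (PySem.Int.mod n 10) (PySem.List.pyGetD f (PySem.Int.mod n 10) 0 + 1))
  else f
termination_by n.toNat
decreasing_by exact pvDiv10_lt n h

def commonDigits (N : Int) (M : Int) : Int :=
  let f1 := pvCountLoop N (List.replicate 10 0)
  let f2 := pvCountLoop M (List.replicate 10 0)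
  (PySem.List.pyRange 0 10 1).foldl
    (fun nrcifre i =>
      if 0 < PySem.List.pyGetD f1 i 0 ∧ 0 < PySem.List.pyGetD f2 i 0 then nrcifre + 1
      else nrcifre) 0

-- ===== PORT B =====
-- B's recursive 'mask(n) = (1 << n%10) | mask(n//10)'; the mask is a nonnegative Python
-- int, represented as a Nat (n%10 is nonnegative, so .toNat on it is exact)
def pvMask (n : Int) : Nat :=
  if h : n > 0 then (1 <<< (PySem.Int.mod n 10).toNat) ||| pvMask (PySem.Int.floordiv n 10)
  else 0
termination_by n.toNat
decreasing_by exact pvDiv10_lt n h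

-- B's recursive 'popcount(m) = (m & 1) + popcount(m >> 1)'
def pvPop (m : Nat) : Int :=
  if h : m = 0 then 0
  else ((m &&& 1 : Nat) : Int) + pvPop (m >>> 1)
termination_by m
decreasing_by simp only [Nat.shiftRight_one]; omega

def commonDigits_alt (N : Int) (M : Int) : Int :=
  pvPop (pvMask N &&& pvMask M)

-- ===== PRECONDITION & SPEC =====
def Spec_commonDigits (N : Int) (M : Int) (out : Int) : Prop := out = commonDigits_alt N M
instance (N : Int) (M : Int) (out : Int) : Decidable (Spec_commonDigits N M out) := by unfold Spec_commonDigits; infer_instance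

-- ===== CLAIM (what is proved, stated in full; the proofs are below) =====
def Claim_equal_commonDigits : Prop := ∀ (N : Int) (M : Int), Dom_commonDigits N M → Spec_commonDigits N M (commonDigits N M)

-- ===== LEMMAS AND PROOFS =====

-- proof-only spec: 'digit i occurs in n' (read off by the same recursion)
def pvHasDigit (n : Int) (i : Int) : Bool :=
  if h : n > 0 then (PySem.Int.mod n 10 == i) || pvHasDigit (PySem.Int.floordiv n 10) i
  else false
termination_by n.toNat
decreasing_by exact pvDiv10_lt n h

theorem pvMod10_bounds (n : Int) : 0 ≤ PySem.Int.mod n 10 ∧ PySem.Int.mod n 10 < 10 := by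
  rw [PySem.Int.mod_eq_emod_of_pos (by norm_num : (0:Int) < 10)]
  omega

theorem pvCountLoop_pos (n : Int) (f : List Int) :
    f.length = 10 → (∀ x ∈ f, 0 ≤ x) → ∀ i : Int, 0 ≤ i → i < 10 →
    (0 < PySem.List.pyGetD (pvCountLoop n f) i 0 ↔
      0 < PySem.List.pyGetD f i 0 ∨ pvHasDigit n i = true) := by
  have H : ∀ (k : Nat) (n : Int) (f : List Int), n.toNat = k →
      f.length = 10 → (∀ x ∈ f, 0 ≤ x) → ∀ i : Int, 0 ≤ i → i < 10 →
      (0 < PySem.List.pyGetD (pvCountLoop n f) i 0 ↔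
        0 < PySem.List.pyGetD f i 0 ∨ pvHasDigit n i = true) := by
    intro k
    induction k using Nat.strong_induction_on with
    | _ k ih =>
      intro n f hk hlen hnn i h0 h10
      by_cases hn : n > 0
      · have hm := pvMod10_bounds n
        have hset : PySem.List.pySetD f (PySem.Int.mod n 10) (PySem.List.pyGetD f (PySem.Int.mod n 10) 0 + 1)
            = f.set (PySem.Int.mod n 10).toNat (PySem.List.pyGetD f (PySem.Int.mod n 10) 0 + 1) :=
          PySem.List.pySetD_of_nonneg f _ hm.1
        have hmemf : PySem.List.pyGetD f (PySem.Int.mod n 10) 0 ∈ f := by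
          rw [PySem.List.pyGetD_eq_getElem f 0 hm.1 (by omega)]
          exact List.getElem_mem _
        have hlen' : (PySem.List.pySetD f (PySem.Int.mod n 10) (PySem.List.pyGetD f (PySem.Int.mod n 10) 0 + 1)).length = 10 := by
          rw [PySem.List.length_pySetD]; exact hlen
        have hnn' : ∀ x ∈ PySem.List.pySetD f (PySem.Int.mod n 10) (PySem.List.pyGetD f (PySem.Int.mod n 10) 0 + 1), 0 ≤ x := by
          rw [hset]
          intro x hx
          rcases List.mem_or_eq_of_mem_set hx with hx | hx
          · exact hnn x hx
          · have := hnn _ hmemf; omega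
        rw [pvCountLoop, dif_pos hn, pvHasDigit, dif_pos hn,
            ih (PySem.Int.floordiv n 10).toNat (hk ▸ pvDiv10_lt n hn) _ _ rfl hlen' hnn' i h0 h10]
        rw [hset, PySem.List.pyGetD_eq_getElem _ 0 h0 (by simp; omega),
            PySem.List.pyGetD_eq_getElem f 0 h0 (by omega)]
        rw [List.getElem_set]
        simp only [Bool.or_eq_true, beq_iff_eq]
        by_cases hi : (PySem.Int.mod n 10).toNat = i.toNat
        · rw [if_pos hi]
          have hmi : PySem.Int.mod n 10 = i := by omega
          have hv : 0 < PySem.List.pyGetD f (PySem.Int.mod n 10) 0 + 1 := by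
            have := hnn _ hmemf; omega
          constructor
          · intro _; exact Or.inr (Or.inl hmi)
          · intro _; exact Or.inl hv
        · rw [if_neg hi]
          have hmi : ¬ PySem.Int.mod n 10 = i := by omega
          constructor
          · rintro (h | h)
            exacts [Or.inl h, Or.inr (Or.inr h)]
          · rintro (h | h | h)
            exacts [Or.inl h, absurd h hmi, Or.inr h]
      · rw [pvCountLoop, dif_neg hn, pvHasDigit, dif_neg hn]
        simp
  exact H n.toNat n f rfl

theorem pvDigit_iff (n i : Int) (h0 : 0 ≤ i) (h10 : i < 10) :
    (0 < PySem.List.pyGetD (pvCountLoop n (List.replicate 10 0)) i 0 ↔ pvHasDigit n i = true) := by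
  rw [pvCountLoop_pos n _ (by simp) (by simp) i h0 h10,
      PySem.List.pyGetD_eq_getElem _ 0 h0 (by simp; omega),
      List.getElem_replicate]
  simp

-- bit i of B's mask is exactly 'digit i occurs in n'
theorem pvMask_testBit (n : Int) (i : Nat) :
    (pvMask n).testBit i = pvHasDigit n (i : Int) := by
  have H : ∀ (k : Nat) (n : Int), n.toNat = k →
      (pvMask n).testBit i = pvHasDigit n (i : Int) := by
    intro k
    induction k using Nat.strong_induction_on with
    | _ k ih =>
      intro n hk
      by_cases hn : n > 0
      · have hm := pvMod10_bounds n
        rw [pvMask, dif_pos hn, pvHasDigit, dif_pos hn,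
            Nat.testBit_or, Nat.one_shiftLeft, Nat.testBit_two_pow,
            ih (PySem.Int.floordiv n 10).toNat (hk ▸ pvDiv10_lt n hn) _ rfl]
        congr 1
        rw [Bool.eq_iff_iff]
        simp only [decide_eq_true_eq, beq_iff_eq]
        omega
      · rw [pvMask, dif_neg hn, pvHasDigit, dif_neg hn, Nat.zero_testBit]
  exact H n.toNat n rfl

theorem pvMask_lt (n : Int) : pvMask n < 1024 := by
  have H : ∀ (k : Nat) (n : Int), n.toNat = k → pvMask n < 1024 := by
    intro k
    induction k using Nat.strong_induction_on with
    | _ k ih =>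
      intro n hk
      by_cases hn : n > 0
      · have hm := pvMod10_bounds n
        rw [pvMask, dif_pos hn]
        have h1 : (1 <<< (PySem.Int.mod n 10).toNat) < 2 ^ 10 := by
          rw [Nat.one_shiftLeft]
          exact Nat.pow_lt_pow_right (by norm_num) (by omega)
        exact Nat.or_lt_two_pow h1
          (ih (PySem.Int.floordiv n 10).toNat (hk ▸ pvDiv10_lt n hn) _ rfl)
      · rw [pvMask, dif_neg hn]; norm_num
  exact H n.toNat n rfl

-- B's recursive popcount counts the set bits below any bound on the argument
theorem pvPop_eq (k : Nat) : ∀ m : Nat, m < 2 ^ k →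
    pvPop m = ((List.range k).countP m.testBit : Int) := by
  induction k with
  | zero =>
    intro m hm
    interval_cases m
    rw [pvPop]
    simp
  | succ k ih =>
    intro m hm
    by_cases h0 : m = 0
    · subst h0
      rw [pvPop]
      have hz : (List.range (k + 1)).countP (Nat.testBit 0) = 0 :=
        List.countP_eq_zero.mpr (by intro a _; simp)
      simp [hz]
    · rw [pvPop, dif_neg h0]
      have hdiv : m >>> 1 = m / 2 := Nat.shiftRight_one m
      have hlt : m >>> 1 < 2 ^ k := by
        rw [hdiv]
        omega
      rw [ih _ hlt, List.range_succ_eq_map, List.countP_cons, List.countP_map]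
      have hbit : ∀ j : Nat, (m >>> 1).testBit j = m.testBit (j + 1) := by
        intro j
        rw [hdiv, ← Nat.testBit_succ]
      have hc : (List.range k).countP ((m >>> 1).testBit) =
          (List.range k).countP (m.testBit ∘ Nat.succ) := by
        apply List.countP_congr
        intro j _
        simpa using hbit j
      rw [hc]
      have hand : (m &&& 1) = m % 2 := Nat.and_one_is_mod m
      by_cases hb : m.testBit 0
      · have : m % 2 = 1 := by
          have := Nat.testBit_zero m ▸ hb
          simpa [Nat.testBit_zero] using hb
        simp [hb, hand, this]
        ring
      · have : m % 2 = 0 := by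
          have hb' := hb
          rw [Nat.testBit_zero] at hb'
          simpa using hb'
        simp [hb, hand, this]
  -- (the branch structure mirrors pvPop's recursion)

-- ===== VERDICT (by name: the statement is the Claim_ definition above) =====
theorem commonDigits_spec : Claim_equal_commonDigits := by
  intro N M _
  unfold Spec_commonDigits commonDigits commonDigits_alt
  dsimp only
  rw [PySem.List.foldl_ite_add_one]
  rw [pvPop_eq 10 _ (by
    have := pvMask_lt N
    have := Nat.and_le_left (n := pvMask N) (m := pvMask M)
    norm_num
    omega)]
  have hrange : PySem.List.pyRange 0 10 1 = (List.range 10).map (fun j : Nat => (j : Int)) := by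
    decide
  rw [hrange, List.countP_map]
  have hpt : ∀ j ∈ List.range 10,
      (decide (0 < PySem.List.pyGetD (pvCountLoop N (List.replicate 10 0)) (j : Int) 0 ∧
        0 < PySem.List.pyGetD (pvCountLoop M (List.replicate 10 0)) (j : Int) 0)) =
      (pvMask N &&& pvMask M).testBit j := by
    intro j hj
    have hj10 : j < 10 := List.mem_range.mp hj
    have e1 := pvDigit_iff N (j : Int) (by omega) (by exact_mod_cast hj10)
    have e2 := pvDigit_iff M (j : Int) (by omega) (by exact_mod_cast hj10)
    rw [Nat.testBit_and, pvMask_testBit, pvMask_testBit,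
        Bool.eq_iff_iff, decide_eq_true_iff, Bool.and_eq_true]
    exact and_congr e1 e2
  have hcount : (List.range 10).countP
      ((fun x : Int => decide (0 < PySem.List.pyGetD (pvCountLoop N (List.replicate 10 0)) x 0 ∧
        0 < PySem.List.pyGetD (pvCountLoop M (List.replicate 10 0)) x 0)) ∘ fun j : Nat => (j : Int)) =
      (List.range 10).countP ((pvMask N &&& pvMask M).testBit) := by
    apply List.countP_congr
    intro j hj
    simp only [Function.comp_apply]
    rw [hpt j hj]
  rw [hcount]
  norm_num
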